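-- pv_equiv track=rewrite | github.com/elisabetj/forritun_lausnir | assignments/07_functions/a07p01lexicographicalorder/alternative_correct_solutions/manual_loop_while.py | precedes
-- ===== SOURCE A (Python) =====
-- def precedes(first: str, second: str) -> str:
--     """Returns the string that comes first in lexicographical order.
--
--     Ignores case.
--     """
--
--     length_of_shorter_string = min(len(first), len(second))
--     index = 0
--     # while index <= length_of_shorter_string - 1:
--     # also works, but let's stick with the shorter version:
--     while index < length_of_shorter_string:
--         letter_in_first = first[index].lower()
--         letter_in_second = second[index].lower()
--
--         if letter_in_first < letter_in_second:
--             return first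
--         elif letter_in_second < letter_in_first:
--             return second
--
--         index += 1
--
--     if len(first) < len(second):
--         return first
--
--     return second
-- ===== SOURCE B (Python) =====
-- def precedes(first: str, second: str) -> str:
--     """Returns the string that comes first in lexicographical order.
--
--     Ignores case.
--     """
--     return first if first.lower() < second.lower() else second
-- ===== Notes on version B (the rewrite author's own statement) =====
-- stated objective: idiomatic
-- what changed: Replaces the explicit index-based while-loop with length tiebreak by a single built-in lexicographic comparison of the two lowercased strings.
import Mathlib
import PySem

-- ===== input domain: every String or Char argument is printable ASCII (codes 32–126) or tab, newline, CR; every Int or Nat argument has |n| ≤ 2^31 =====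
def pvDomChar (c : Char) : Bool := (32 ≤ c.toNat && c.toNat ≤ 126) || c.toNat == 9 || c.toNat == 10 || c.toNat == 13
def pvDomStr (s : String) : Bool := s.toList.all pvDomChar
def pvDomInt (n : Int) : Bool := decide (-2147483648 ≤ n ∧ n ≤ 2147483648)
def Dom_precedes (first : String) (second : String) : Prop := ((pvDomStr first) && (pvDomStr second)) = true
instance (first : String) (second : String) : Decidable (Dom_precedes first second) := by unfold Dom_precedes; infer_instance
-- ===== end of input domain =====

-- B replaces A's index-driven while-loop and explicit length tiebreak by one built-in
-- lexicographic comparison of the two lowercased strings (objective: idiomatic).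

-- ===== PORT A =====
-- the while-loop of A: index runs from 0 up to m = min(len(first), len(second))
def precedesGo (first : String) (second : String) (m : Nat) (index : Nat) : String :=
  if index < m then
    let letter_in_first := PySem.Chars.lowerChar (first.toList.getD index ' ')
    let letter_in_second := PySem.Chars.lowerChar (second.toList.getD index ' ')
    if letter_in_first < letter_in_second then first
    else if letter_in_second < letter_in_first then second
    else precedesGo first second m (index + 1)
  else if first.toList.length < second.toList.length then first else second
termination_by m - index

def precedes (first : String) (second : String) : String :=
  precedesGo first second (min first.toList.length second.toList.length) 0

-- ===== PORT B =====
def precedes_alt (first : String) (second : String) : String :=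
  if PySem.Str.lower first < PySem.Str.lower second then first else second

-- ===== PRECONDITION & SPEC =====
def Spec_precedes (first : String) (second : String) (out : String) : Prop := out = precedes_alt first second
instance (first : String) (second : String) (out : String) : Decidable (Spec_precedes first second out) := by unfold Spec_precedes; infer_instance

-- ===== CLAIM (what is proved, stated in full; the proofs are below) =====
def Claim_equal_precedes : Prop := ∀ (first : String) (second : String), Dom_precedes first second → Spec_precedes first second (precedes first second)

-- ===== LEMMAS AND PROOFS =====

-- the loop from position `index` decides the lexicographic comparison of the lowered suffixes
theorem precedesGo_eq (first second : String) (index : Nat)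
    (h : index ≤ min first.toList.length second.toList.length) :
    precedesGo first second (min first.toList.length second.toList.length) index =
      if (first.toList.map PySem.Chars.lowerChar).drop index <
          (second.toList.map PySem.Chars.lowerChar).drop index then first else second := by
  set fl := first.toList with hfl
  set sl := second.toList with hsl
  generalize hm : min fl.length sl.length = m at *
  induction hn : m - index generalizing index with
  | zero =>
    have hidx : index = m := by omega
    subst hidx
    rw [precedesGo]
    simp only [lt_irrefl, if_false]
    rcases Nat.lt_or_ge fl.length sl.length with hlt | hge
    · have h1 : (fl.map PySem.Chars.lowerChar).drop index = [] := by
        rw [List.drop_eq_nil_iff]; simp; omega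
      have h2 : index < (sl.map PySem.Chars.lowerChar).length := by simp; omega
      rw [h1, List.drop_eq_getElem_cons h2, if_pos hlt, if_pos (List.nil_lt_cons _ _)]
    · have h2 : (sl.map PySem.Chars.lowerChar).drop index = [] := by
        rw [List.drop_eq_nil_iff]; simp; omega
      rw [h2, if_neg (Nat.not_lt.mpr hge), if_neg (List.not_lt_nil _)]
  | succ n ih =>
    have hidx : index < m := by omega
    have hf : index < fl.length := by omega
    have hs : index < sl.length := by omega
    rw [precedesGo]
    simp only [hidx, if_true]
    have hdf : (fl.map PySem.Chars.lowerChar).drop index =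
        PySem.Chars.lowerChar fl[index] :: (fl.map PySem.Chars.lowerChar).drop (index + 1) := by
      rw [List.drop_eq_getElem_cons (by simpa using hf)]; simp
    have hds : (sl.map PySem.Chars.lowerChar).drop index =
        PySem.Chars.lowerChar sl[index] :: (sl.map PySem.Chars.lowerChar).drop (index + 1) := by
      rw [List.drop_eq_getElem_cons (by simpa using hs)]; simp
    rw [hdf, hds]
    rw [List.getD_eq_getElem fl ' ' hf, List.getD_eq_getElem sl ' ' hs]
    set a := PySem.Chars.lowerChar fl[index]
    set b := PySem.Chars.lowerChar sl[index]
    rcases lt_trichotomy a b with hab | hab | hab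
    · simp [hab, List.cons_lt_cons_iff]
    · simp only [hab, lt_self_iff_false, if_false]
      rw [ih (index + 1) (by omega) (by omega)]
      simp
    · have h1 : ¬ a < b := lt_asymm hab
      have h2 : a ≠ b := (ne_of_gt hab)
      simp [h1, hab, List.cons_lt_cons_iff, h2]

-- ===== VERDICT (by name: the statement is the Claim_ definition above) =====
theorem precedes_spec : Claim_equal_precedes := by
  intro first second _
  unfold Spec_precedes precedes precedes_alt
  rw [precedesGo_eq first second 0 (Nat.zero_le _)]
  simp only [List.drop_zero]
  have hiff : (PySem.Str.lower first < PySem.Str.lower second) ↔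
      first.toList.map PySem.Chars.lowerChar < second.toList.map PySem.Chars.lowerChar := by
    rw [String.lt_iff_toList_lt]
    simp [PySem.Str.toList_lower, PySem.Chars.lower]
  by_cases hc : first.toList.map PySem.Chars.lowerChar < second.toList.map PySem.Chars.lowerChar
  · rw [if_pos hc, if_pos (hiff.mpr hc)]
  · rw [if_neg hc, if_neg (fun h => hc (hiff.mp h))]
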